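-- pv_equiv track=rewrite | github.com/ManikumarPokala/nivoxai | backend-ai/eval/run_eval.py | _build_truth_vectors
-- ===== SOURCE A (Python) =====
-- from typing import Dict, List, Tuple
--
-- def _build_truth_vectors(
--     influencers: List[dict], relevance: Dict[str, int]
-- ) -> Tuple[List[float], List[int]]:
--     y_true_relevances: List[float] = []
--     y_true_binary: List[int] = []
--     for influencer in influencers:
--         rel = int(relevance.get(influencer["id"], 0))
--         y_true_relevances.append(rel)
--         y_true_binary.append(1 if rel >= 2 else 0)
--     return y_true_relevances, y_true_binary
-- ===== SOURCE B (Python) =====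
-- from typing import Dict, List, Tuple
--
-- def _build_truth_vectors(
--     influencers: List[dict], relevance: Dict[str, int]
-- ) -> Tuple[List[float], List[int]]:
--     # Inverted traversal: index influencer positions by id once, pre-fill the
--     # relevances with the default 0, then iterate over the RELEVANCE dict and
--     # scatter each value into every position carrying that id; the binary
--     # vector is derived by a final pass over the relevances list.
--     pos: Dict[str, List[int]] = {}
--     for i, influencer in enumerate(influencers):
--         pos.setdefault(influencer["id"], []).append(i)
--     y_true_relevances = [0] * len(influencers)
--     for key, val in relevance.items():
--         for i in pos.get(key, []):
--             y_true_relevances[i] = int(val)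
--     y_true_binary = [1 if r >= 2 else 0 for r in y_true_relevances]
--     return y_true_relevances, y_true_binary
-- ===== Notes on version B (the rewrite author's own statement) =====
-- stated objective: alternative
-- what changed: Inverts the traversal: instead of A's single fused loop over influencers doing one dict lookup per influencer, B builds a position index id->list of indices once, pre-fills the relevances with 0, scatters values by iterating over the relevance dict, and derives the binary vector in a final pass over the relevances list.
import Mathlib
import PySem

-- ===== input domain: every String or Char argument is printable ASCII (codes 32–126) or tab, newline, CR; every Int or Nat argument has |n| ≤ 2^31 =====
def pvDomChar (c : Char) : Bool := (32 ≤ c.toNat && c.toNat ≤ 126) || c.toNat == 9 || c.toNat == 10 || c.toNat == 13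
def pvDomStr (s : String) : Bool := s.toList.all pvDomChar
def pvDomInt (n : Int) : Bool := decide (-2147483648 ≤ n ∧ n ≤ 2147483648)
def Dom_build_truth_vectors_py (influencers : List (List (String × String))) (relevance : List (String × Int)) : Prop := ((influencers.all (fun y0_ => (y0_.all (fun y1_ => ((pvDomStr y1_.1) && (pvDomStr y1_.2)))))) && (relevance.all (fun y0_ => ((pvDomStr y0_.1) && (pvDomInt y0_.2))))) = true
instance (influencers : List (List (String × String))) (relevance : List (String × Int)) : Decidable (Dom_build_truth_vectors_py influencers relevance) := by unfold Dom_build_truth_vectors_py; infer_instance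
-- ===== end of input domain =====

-- B inverts the traversal: it indexes influencer positions by id once, pre-fills the
-- relevances with 0, scatters by iterating over the relevance dict, and derives the
-- binary vector by a final pass over the relevances list (objective: alternative).

-- first-match association-list lookup (exact port of Python dict lookup on the assoc-list encoding)
def pvAssocGet? {α : Type} (d : List (String × α)) (k : String) : Option α :=
  match d with
  | [] => none
  | (k', v) :: rest => if k' == k then some v else pvAssocGet? rest k

-- ===== PORT A =====
def build_truth_vectors_py (influencers : List (List (String × String))) (relevance : List (String × Int)) : List Int × List Int :=
  influencers.foldl
    (fun acc influencer =>
      -- rel = int(relevance.get(influencer["id"], 0)); int() on an int is the identity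
      let rel := (pvAssocGet? relevance ((pvAssocGet? influencer "id").getD "")).getD 0
      (acc.1 ++ [rel], acc.2 ++ [if rel ≥ 2 then (1 : Int) else 0]))
    ([], [])

-- ===== PORT B =====
-- y_true_relevances[i] = int(val): the loop indices come from enumerate, hence
-- 0 ≤ i < len, where Python list assignment is exactly List.set i.toNat.
def build_truth_vectors_py_alt (influencers : List (List (String × String))) (relevance : List (String × Int)) : List Int × List Int :=
  let pos := (PySem.List.enumerate influencers 0).foldl
    (fun d p => d.modify ((pvAssocGet? p.2 "id").getD "") [] (· ++ [p.1]))
    (PySem.Dict.empty : PySem.Dict String (List Int))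
  let y0 := List.replicate influencers.length (0 : Int)
  let y_true_relevances := relevance.foldl
    (fun arr kv => (pos.getD kv.1 []).foldl (fun a i => a.set i.toNat kv.2) arr) y0
  let y_true_binary := y_true_relevances.map (fun r => if r ≥ 2 then (1 : Int) else 0)
  (y_true_relevances, y_true_binary)

-- ===== PRECONDITION & SPEC =====
-- Pre_ excludes (a) influencer dicts without an "id" key, on which both A and B raise
-- KeyError, and (b) relevance association lists with duplicate keys, which encode no
-- Python dict (a real dict's keys are unique) and on which first-match vs overwrite
-- order is an artefact of the encoding.
def Pre_build_truth_vectors_py (influencers : List (List (String × String))) (relevance : List (String × Int)) : Prop :=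
  (∀ inf ∈ influencers, "id" ∈ inf.map Prod.fst) ∧ (relevance.map Prod.fst).Nodup
instance (influencers : List (List (String × String))) (relevance : List (String × Int)) : Decidable (Pre_build_truth_vectors_py influencers relevance) := by unfold Pre_build_truth_vectors_py; infer_instance

def pvWitness_build_truth_vectors_py : (List (List (String × String))) × (List (String × Int)) :=
  ([[("id", "a")], [("id", "b"), ("name", "B")], [("id", "a")]], [("a", 3), ("c", 1)])

def Spec_build_truth_vectors_py (influencers : List (List (String × String))) (relevance : List (String × Int)) (out : List Int × List Int) : Prop := out = build_truth_vectors_py_alt influencers relevance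
instance (influencers : List (List (String × String))) (relevance : List (String × Int)) (out : List Int × List Int) : Decidable (Spec_build_truth_vectors_py influencers relevance out) := by unfold Spec_build_truth_vectors_py; infer_instance

-- ===== CLAIM (what is proved, stated in full; the proofs are below) =====
def Claim_equal_build_truth_vectors_py : Prop := ∀ (influencers : List (List (String × String))) (relevance : List (String × Int)), Dom_build_truth_vectors_py influencers relevance → Pre_build_truth_vectors_py influencers relevance → Spec_build_truth_vectors_py influencers relevance (build_truth_vectors_py influencers relevance)

-- ===== LEMMAS AND PROOFS =====

-- A's fused loop, characterised: accumulators become map / map-of-map.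
theorem build_truth_vectors_foldl_acc (influencers : List (List (String × String))) (relevance : List (String × Int)) (a b : List Int) :
    influencers.foldl
      (fun acc influencer =>
        let rel := (pvAssocGet? relevance ((pvAssocGet? influencer "id").getD "")).getD 0
        (acc.1 ++ [rel], acc.2 ++ [if rel ≥ 2 then (1 : Int) else 0]))
      (a, b)
    = (a ++ influencers.map (fun inf => (pvAssocGet? relevance ((pvAssocGet? inf "id").getD "")).getD 0),
       b ++ (influencers.map (fun inf => (pvAssocGet? relevance ((pvAssocGet? inf "id").getD "")).getD 0)).map
              (fun r => if r ≥ 2 then (1 : Int) else 0)) := by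
  induction influencers generalizing a b with
  | nil => simp
  | cons h t ih => simp [List.foldl, ih]

-- the inner scatter loop: length is preserved
theorem scatterOne_length (l : List Int) (v : Int) (arr : List Int) :
    (l.foldl (fun a i => a.set i.toNat v) arr).length = arr.length := by
  induction l generalizing arr with
  | nil => rfl
  | cons x t ih => simp [List.foldl, ih]

-- the inner scatter loop: untouched positions keep their value
theorem scatterOne_getElem?_not_mem (l : List Int) (v : Int) (arr : List Int) (i : Nat)
    (h : ∀ x ∈ l, x.toNat ≠ i) :
    (l.foldl (fun a i => a.set i.toNat v) arr)[i]? = arr[i]? := by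
  induction l generalizing arr with
  | nil => rfl
  | cons x t ih =>
    simp only [List.foldl]
    rw [ih _ (fun y hy => h y (List.mem_cons_of_mem _ hy)),
        List.getElem?_set_ne (h x (List.mem_cons_self))]

-- the inner scatter loop: touched positions get the value
theorem scatterOne_getElem?_mem (l : List Int) (v : Int) (arr : List Int) (i : Nat)
    (hi : i < arr.length) (h : ∃ x ∈ l, x.toNat = i) :
    (l.foldl (fun a i => a.set i.toNat v) arr)[i]? = some v := by
  induction l generalizing arr with
  | nil => simp at h
  | cons x t ih =>
    simp only [List.foldl]
    by_cases ht : ∃ y ∈ t, y.toNat = i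
    · exact ih _ (by simpa using hi) ht
    · have hx : x.toNat = i := by
        rcases h with ⟨y, hy, hyi⟩
        rcases List.mem_cons.mp hy with rfl | hyt
        · exact hyi
        · exact absurd ⟨y, hyt, hyi⟩ ht
      push Not at ht
      rw [scatterOne_getElem?_not_mem _ _ _ _ ht, hx, List.getElem?_set_self' ,]
      simp [hi]

-- the outer scatter loop preserves a position no key writes to
theorem scatter_getElem?_not_mem (rel : List (String × Int)) (pos : String → List Int)
    (arr : List Int) (i : Nat) (h : ∀ kv ∈ rel, ∀ x ∈ pos kv.1, x.toNat ≠ i) :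
    (rel.foldl (fun arr kv => (pos kv.1).foldl (fun a j => a.set j.toNat kv.2) arr) arr)[i]? = arr[i]? := by
  induction rel generalizing arr with
  | nil => rfl
  | cons kv t ih =>
    simp only [List.foldl]
    rw [ih _ (fun kv' h' => h kv' (List.mem_cons_of_mem _ h')),
        scatterOne_getElem?_not_mem _ _ _ _ (h kv List.mem_cons_self)]

theorem scatter_length (rel : List (String × Int)) (pos : String → List Int) (arr : List Int) :
    (rel.foldl (fun arr kv => (pos kv.1).foldl (fun a j => a.set j.toNat kv.2) arr) arr).length = arr.length := by
  induction rel generalizing arr with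
  | nil => rfl
  | cons kv t ih => simp [List.foldl, ih, scatterOne_length]

-- the scatter result, pointwise: first-match lookup if the id occurs, else the initial value
theorem scatter_getElem? (rel : List (String × Int)) (pos : String → List Int)
    (arr : List Int) (i : Nat) (hi : i < arr.length) (k : String)
    (hnd : (rel.map Prod.fst).Nodup)
    (hpos : ∀ k' x, x ∈ pos k' → x.toNat = i → k' = k)
    (hk : ∃ x ∈ pos k, x.toNat = i) :
    (rel.foldl (fun arr kv => (pos kv.1).foldl (fun a j => a.set j.toNat kv.2) arr) arr)[i]?
      = some ((pvAssocGet? rel k).getD (arr[i]'hi)) := by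
  induction rel generalizing arr with
  | nil => simp [pvAssocGet?, List.getElem?_eq_getElem hi]
  | cons kv t ih =>
    simp only [List.foldl]
    have hlen : ((pos kv.1).foldl (fun a j => a.set j.toNat kv.2) arr).length = arr.length :=
      scatterOne_length _ _ _
    obtain ⟨hk1, hndt⟩ : kv.1 ∉ t.map Prod.fst ∧ (t.map Prod.fst).Nodup := by
      simpa [List.map_cons, List.nodup_cons] using hnd
    by_cases hkv : kv.1 = k
    · -- the head writes v at i; the tail never touches i (keys are distinct)
      have hnever : ∀ kv' ∈ t, ∀ x ∈ pos kv'.1, x.toNat ≠ i := by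
        intro kv' hkv' x hx hxi
        have h1 : kv'.1 = k := hpos kv'.1 x hx hxi
        exact hk1 (by rw [hkv, ← h1]; exact List.mem_map_of_mem hkv')
      rw [scatter_getElem?_not_mem _ _ _ _ hnever,
          scatterOne_getElem?_mem _ _ _ _ hi (hkv ▸ hk)]
      simp [pvAssocGet?, hkv]
    · -- the head never touches i; recurse
      have hhead : ∀ x ∈ pos kv.1, x.toNat ≠ i := by
        intro x hx hxi
        exact hkv (hpos kv.1 x hx hxi)
      have harr : ((pos kv.1).foldl (fun a j => a.set j.toNat kv.2) arr)[i]? = arr[i]? :=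
        scatterOne_getElem?_not_mem _ _ _ _ hhead
      have hi' : i < ((pos kv.1).foldl (fun a j => a.set j.toNat kv.2) arr).length := hlen ▸ hi
      rw [ih _ hi' hndt]
      have heq : ((pos kv.1).foldl (fun a j => a.set j.toNat kv.2) arr)[i]'hi' = arr[i]'hi := by
        rw [List.getElem?_eq_getElem hi', List.getElem?_eq_getElem hi] at harr
        exact Option.some.inj harr
      simp [pvAssocGet?, hkv, heq]

-- membership in B's position index, characterised
theorem posL_mem (influencers : List (List (String × String))) (k : String) (x : Int) :
    x ∈ ((PySem.List.enumerate influencers 0).foldl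
        (fun d p => d.modify ((pvAssocGet? p.2 "id").getD "") [] (· ++ [p.1]))
        (PySem.Dict.empty : PySem.Dict String (List Int))).getD k []
      ↔ ∃ (j : Nat) (_ : j < influencers.length),
          x = (j : Int) ∧ (pvAssocGet? (influencers[j]) "id").getD "" = k := by
  have hf : (PySem.List.enumerate influencers 0).foldl
      (fun d p => d.modify ((pvAssocGet? p.2 "id").getD "") [] (· ++ [p.1]))
      (PySem.Dict.empty : PySem.Dict String (List Int))
    = ((PySem.List.enumerate influencers 0).map
        (fun p => (((pvAssocGet? p.2 "id").getD ""), p.1))).foldl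
        (fun d q => d.modify q.1 [] (· ++ [q.2])) PySem.Dict.empty :=
    by rw [List.foldl_map]
  rw [hf, PySem.Dict.getD_foldl_modify_append]
  simp only [PySem.Dict.getD_empty, List.nil_append, List.mem_map, List.mem_filter,
    PySem.List.mem_enumerate_iff]
  constructor
  · rintro ⟨q, ⟨⟨p, ⟨j, hj, rfl⟩, rfl⟩, hq⟩, rfl⟩
    refine ⟨j, hj, by simp, ?_⟩
    simpa using (beq_iff_eq.mp (by simpa using hq))
  · rintro ⟨j, hj, rfl, hk⟩
    exact ⟨(k, (j : Int)), ⟨⟨((j : Int), influencers[j]), ⟨j, hj, by simp⟩, by simp [hk]⟩, by simp⟩, rfl⟩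

-- ===== VERDICT (by name: the statement is the Claim_ definition above) =====
theorem build_truth_vectors_py_spec : Claim_equal_build_truth_vectors_py := by
  intro influencers relevance _ hpre
  obtain ⟨-, hnd⟩ := hpre
  unfold Spec_build_truth_vectors_py build_truth_vectors_py build_truth_vectors_py_alt
  rw [build_truth_vectors_foldl_acc influencers relevance [] []]
  simp only [List.nil_append]
  set n := influencers.length with hn
  set rels := influencers.map (fun inf => (pvAssocGet? relevance ((pvAssocGet? inf "id").getD "")).getD 0) with hrels
  set pos := ((PySem.List.enumerate influencers 0).foldl
      (fun d p => d.modify ((pvAssocGet? p.2 "id").getD "") [] (· ++ [p.1]))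
      (PySem.Dict.empty : PySem.Dict String (List Int))) with hposd
  have key : relevance.foldl
      (fun arr kv => (pos.getD kv.1 []).foldl (fun a i => a.set i.toNat kv.2) arr)
      (List.replicate n (0 : Int)) = rels := by
    apply List.ext_getElem?
    intro i
    by_cases hi : i < n
    · have hiarr : i < (List.replicate n (0 : Int)).length := by simpa using hi
      rw [scatter_getElem? relevance (fun k => pos.getD k []) _ i hiarr
            ((pvAssocGet? (influencers[i]'hi) "id").getD "") hnd]
      · have h0 : (List.replicate n (0 : Int))[i]'hiarr = 0 := List.getElem_replicate ..
        rw [h0, hrels, List.getElem?_map, List.getElem?_eq_getElem hi]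
        simp
      · intro k' x hx hxi
        obtain ⟨j, hj, rfl, hk⟩ := (posL_mem influencers k' x).mp hx
        have hji : j = i := by simpa using hxi
        subst hji; exact hk.symm
      · exact ⟨(i : Int), (posL_mem influencers _ _).mpr ⟨i, hi, rfl, rfl⟩, by simp⟩
    · have h1 : (relevance.foldl
          (fun arr kv => (pos.getD kv.1 []).foldl (fun a i => a.set i.toNat kv.2) arr)
          (List.replicate n (0 : Int))).length = n := by
        simpa using scatter_length relevance (fun k => pos.getD k []) (List.replicate n 0)
      rw [List.getElem?_eq_none (by omega), List.getElem?_eq_none (by simp [hrels]; omega)]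
  simp only [key]
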